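-- pv_equiv track=rewrite | github.com/tomasvanagas/prime-research | experiments/wildcard/convolution_sieve.py | legendre_phi
-- ===== SOURCE A (Python) =====
-- def legendre_phi(x, primes):
--     """
--     Compute phi(x, a) = #{n <= x : n has no prime factor <= primes[-1]}
--     via inclusion-exclusion over squarefree products of primes.
--     phi(x, a) = sum over subsets S of primes: (-1)^|S| * floor(x / prod(S))
--     """
--     a = len(primes)
--     if a > 24:
--         raise ValueError(f"Too many primes ({a}) for brute-force Legendre: 2^{a} iterations")
--     total = 0
--     for mask in range(1 << a):
--         d = 1
--         bits = 0
--         for i in range(a):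
--             if mask & (1 << i):
--                 d *= primes[i]
--                 bits += 1
--         if d <= x:
--             mu_d = (-1) ** bits
--             total += mu_d * (x // d)
--     return total
-- ===== SOURCE B (Python) =====
-- def legendre_phi(x, primes):
--     """
--     Same value as A: sum over subsets S of primes with prod(S) <= x of
--     (-1)^|S| * (x // prod(S)), but the signed subset products are built
--     incrementally by list doubling (one entry per subset), so there is no
--     per-mask inner bit loop.
--     """
--     subsets = [(1, 1)]
--     for p in primes:
--         subsets += [(d * p, -s) for (d, s) in subsets]
--     total = 0
--     for (d, s) in subsets:
--         if d <= x:
--             total += s * (x // d)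
--     return total
-- ===== Notes on version B (the rewrite author's own statement) =====
-- stated objective: faster
-- what changed: Replaces the bitmask enumeration with an inner per-mask bit/index loop by an incremental list-doubling construction of all signed squarefree subset products (one entry per subset), followed by a single summation pass, removing the O(a) inner loop per mask.
import Mathlib
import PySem

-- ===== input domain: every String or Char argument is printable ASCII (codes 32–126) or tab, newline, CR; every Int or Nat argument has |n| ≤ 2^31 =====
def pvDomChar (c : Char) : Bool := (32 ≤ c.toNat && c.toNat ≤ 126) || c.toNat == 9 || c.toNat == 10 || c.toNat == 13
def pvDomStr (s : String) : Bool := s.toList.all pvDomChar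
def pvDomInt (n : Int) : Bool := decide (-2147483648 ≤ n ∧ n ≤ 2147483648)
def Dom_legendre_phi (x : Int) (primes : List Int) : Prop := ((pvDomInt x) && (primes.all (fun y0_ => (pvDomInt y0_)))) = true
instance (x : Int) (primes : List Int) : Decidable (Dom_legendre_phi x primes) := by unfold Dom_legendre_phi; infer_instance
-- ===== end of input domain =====

-- B replaces A's bitmask loop (with an inner per-mask bit loop) by a list-doubling
-- construction of the signed subset products, one entry per subset (measured faster).

-- ===== PORT A =====
-- literal port of A's double loop; `mask & (1 << i)` is `mask &&& (1 <<< i)` on Nat,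
-- `x // d` is PySem.Int.floordiv; the `a > 24` branch is where Python raises ValueError
-- (excluded by Pre_), the port returns 0 there.
def legendre_phi (x : Int) (primes : List Int) : Int :=
  let a := primes.length
  if 24 < a then 0
  else
    (List.range (2 ^ a)).foldl (fun total mask =>
      let db := (List.range a).foldl (fun (db : Int × Nat) i =>
        if mask &&& (1 <<< i) ≠ 0 then (db.1 * primes.getD i 0, db.2 + 1) else db) (1, 0)
      if db.1 ≤ x then total + (-1) ^ db.2 * PySem.Int.floordiv x db.1 else total) 0

-- ===== PORT B =====
def legendre_phi_alt (x : Int) (primes : List Int) : Int :=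
  let subsets := primes.foldl
    (fun acc p => acc ++ acc.map (fun ds => (ds.1 * p, -ds.2))) [((1 : Int), (1 : Int))]
  subsets.foldl (fun total ds =>
    if ds.1 ≤ x then total + ds.2 * PySem.Int.floordiv x ds.1 else total) 0

-- ===== PRECONDITION & SPEC =====
-- A raises ValueError when len(primes) > 24, and ZeroDivisionError when 0 ∈ primes
-- and 0 ≤ x (the subset {0} has product 0 ≤ x); Pre_ excludes exactly those inputs.
def Pre_legendre_phi (x : Int) (primes : List Int) : Prop :=
  primes.length ≤ 24 ∧ ((0 : Int) ∈ primes → x < 0)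
instance (x : Int) (primes : List Int) : Decidable (Pre_legendre_phi x primes) := by
  unfold Pre_legendre_phi; infer_instance
def pvWitness_legendre_phi : Int × List Int := (20, [2, 3, 5])

def Spec_legendre_phi (x : Int) (primes : List Int) (out : Int) : Prop := out = legendre_phi_alt x primes
instance (x : Int) (primes : List Int) (out : Int) : Decidable (Spec_legendre_phi x primes out) := by unfold Spec_legendre_phi; infer_instance

-- ===== CLAIM (what is proved, stated in full; the proofs are below) =====
def Claim_equal_legendre_phi : Prop := ∀ (x : Int) (primes : List Int), Dom_legendre_phi x primes → Pre_legendre_phi x primes → Spec_legendre_phi x primes (legendre_phi x primes)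

-- ===== LEMMAS AND PROOFS =====

-- the subset product selected by the low bits of m
def pProd : List Int → Nat → Int
  | [], _ => 1
  | p :: ps, m => (if m % 2 = 1 then p else 1) * pProd ps (m / 2)

-- the corresponding sign (-1)^|subset|
def pSign : List Int → Nat → Int
  | [], _ => 1
  | _ :: ps, m => (if m % 2 = 1 then -1 else 1) * pSign ps (m / 2)

-- the corresponding popcount (restricted to the list's length)
def pCnt : List Int → Nat → Nat
  | [], _ => 0
  | _ :: ps, m => (if m % 2 = 1 then 1 else 0) + pCnt ps (m / 2)

theorem pSign_eq_neg_one_pow (ps : List Int) (m : Nat) :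
    pSign ps m = (-1 : Int) ^ pCnt ps m := by
  induction ps generalizing m with
  | nil => simp [pSign, pCnt]
  | cons p t ih =>
    by_cases h : m % 2 = 1 <;> simp [pSign, pCnt, h, ih, pow_add, pow_succ]

theorem bit_test (m i : Nat) : (m &&& (1 <<< i) ≠ 0) ↔ m.testBit i := by
  rw [Nat.shiftLeft_eq, one_mul, Nat.and_two_pow]
  by_cases h : m.testBit i <;> simp [h]

theorem inner_fold (ps : List Int) (m : Nat) (d : Int) (b : Nat) :
    (List.range ps.length).foldl (fun (db : Int × Nat) i =>
        if m &&& (1 <<< i) ≠ 0 then (db.1 * ps.getD i 0, db.2 + 1) else db) (d, b)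
      = (d * pProd ps m, b + pCnt ps m) := by
  induction ps generalizing m d b with
  | nil => simp [pProd, pCnt]
  | cons p t ih =>
    have hbit0 : (m &&& (1 <<< 0) ≠ 0) ↔ m % 2 = 1 := by
      rw [bit_test]; simp [Nat.testBit_zero]
    have hbit : ∀ i, (m &&& (1 <<< (i + 1)) ≠ 0) = ((m / 2) &&& (1 <<< i) ≠ 0) := by
      intro i
      simp only [bit_test, Nat.testBit_add_one]
    rw [List.length_cons, List.range_succ_eq_map, List.foldl_cons, List.foldl_map]
    by_cases h : m % 2 = 1
    · rw [if_pos (hbit0.mpr h)]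
      simp only [List.getD_cons_succ, List.getD_cons_zero, hbit]
      rw [ih (m / 2) (d * p) (b + 1)]
      simp [pProd, pCnt, h, mul_assoc, Nat.add_assoc, Nat.add_comm 1]
    · rw [if_neg (fun hc => h (hbit0.mp hc))]
      simp only [List.getD_cons_succ, hbit]
      rw [ih (m / 2) d b]
      simp [pProd, pCnt, h]

theorem pvRangeTwoMul (n : Nat) :
    List.range (2 * n) = (List.range n).flatMap (fun m => [2 * m, 2 * m + 1]) := by
  induction n with
  | zero => simp
  | succ n ih =>
    have : 2 * (n + 1) = (2 * n + 1) + 1 := by ring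
    rw [this, List.range_succ, List.range_succ, ih, List.range_succ]
    simp [List.flatMap_append]

theorem doubling (ps : List Int) (acc : List (Int × Int)) :
    ps.foldl (fun acc p => acc ++ acc.map (fun ds => (ds.1 * p, -ds.2))) acc
      = (List.range (2 ^ ps.length)).flatMap
          (fun m => acc.map (fun e => (e.1 * pProd ps m, e.2 * pSign ps m))) := by
  induction ps generalizing acc with
  | nil => simp [pProd, pSign]
  | cons p t ih =>
    rw [List.foldl_cons, ih]
    have hlen : 2 ^ (p :: t).length = 2 * 2 ^ t.length := by
      simp [List.length_cons, pow_succ, mul_comm]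
    rw [hlen, pvRangeTwoMul, List.flatMap_assoc]
    apply List.flatMap_congr
    intro m _
    have hm0 : (2 * m) % 2 = 0 := by omega
    have hd0 : (2 * m) / 2 = m := by omega
    have hm1 : (2 * m + 1) % 2 = 1 := by omega
    have hd1 : (2 * m + 1) / 2 = m := by omega
    have e0p : pProd (p :: t) (2 * m) = pProd t m := by
      show (if (2 * m) % 2 = 1 then p else 1) * pProd t ((2 * m) / 2) = pProd t m
      rw [hm0, hd0]; simp
    have e0s : pSign (p :: t) (2 * m) = pSign t m := by
      show (if (2 * m) % 2 = 1 then (-1 : Int) else 1) * pSign t ((2 * m) / 2) = pSign t m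
      rw [hm0, hd0]; simp
    have e1p : pProd (p :: t) (2 * m + 1) = p * pProd t m := by
      show (if (2 * m + 1) % 2 = 1 then p else 1) * pProd t ((2 * m + 1) / 2) = p * pProd t m
      rw [hm1, hd1]; simp
    have e1s : pSign (p :: t) (2 * m + 1) = -pSign t m := by
      show (if (2 * m + 1) % 2 = 1 then (-1 : Int) else 1) * pSign t ((2 * m + 1) / 2) = -pSign t m
      rw [hm1, hd1]; simp
    simp only [List.flatMap_cons, List.flatMap_nil, List.append_nil, e0p, e0s, e1p, e1s,
      List.map_append, List.map_map]
    congr 1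
    apply List.map_congr_left
    intro ds _
    simp only [Function.comp_apply, Prod.mk.injEq]
    constructor <;> ring

-- ===== VERDICT (by name: the statement is the Claim_ definition above) =====
theorem legendre_phi_spec : Claim_equal_legendre_phi := by
  intro x primes _ hpre
  have h24 : primes.length ≤ 24 := hpre.1
  unfold Spec_legendre_phi legendre_phi legendre_phi_alt
  rw [if_neg (by omega : ¬ 24 < primes.length)]
  rw [doubling]
  have hsingle :
      (List.range (2 ^ primes.length)).flatMap
          (fun m => [((1 : Int), (1 : Int))].map
            (fun e => (e.1 * pProd primes m, e.2 * pSign primes m)))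
        = (List.range (2 ^ primes.length)).map
            (fun m => (pProd primes m, pSign primes m)) := by
    induction List.range (2 ^ primes.length) with
    | nil => rfl
    | cons h t ih => simp_all
  rw [hsingle, List.foldl_map]
  apply List.foldl_ext
  intro total m _
  rw [inner_fold primes m 1 0]
  rw [pSign_eq_neg_one_pow]
  simp
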